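-- pv_equiv track=rewrite | github.com/jiadaizhao/LintCode | 1601-1700/1639-K-Substring with K different characters/1639-K-Substring with K different characters.py | KSubstring
-- ===== SOURCE A (Python) =====
-- import collections
--
-- def KSubstring(stringIn, K):
--     # Write your code here
--     table = collections.Counter()
--     start = 0
--     result = set()
--     for i in range(len(stringIn)):
--         table[stringIn[i]] += 1
--         if i - start + 1 == K and len(table) == K:
--             result.add(stringIn[start: i + 1])
--         if i >= K - 1:
--             table[stringIn[start]] -= 1
--             if table[stringIn[start]] == 0:
--                 del table[stringIn[start]]
--             start += 1
--     return len(result)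
-- ===== SOURCE B (Python) =====
-- def KSubstring(stringIn, K):
--     if K <= 0:
--         return 0
--     result = set()
--     for i in range(len(stringIn) - K + 1):
--         sub = stringIn[i:i + K]
--         if len(set(sub)) == K:
--             result.add(sub)
--     return len(result)
-- ===== Notes on version B (the rewrite author's own statement) =====
-- stated objective: simpler
-- what changed: B drops A's rolling Counter and sliding start pointer entirely: it directly scans each fixed length-K window, recomputes its distinct-character count with set(sub), and collects the qualifying substrings in a set.
import Mathlib
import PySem

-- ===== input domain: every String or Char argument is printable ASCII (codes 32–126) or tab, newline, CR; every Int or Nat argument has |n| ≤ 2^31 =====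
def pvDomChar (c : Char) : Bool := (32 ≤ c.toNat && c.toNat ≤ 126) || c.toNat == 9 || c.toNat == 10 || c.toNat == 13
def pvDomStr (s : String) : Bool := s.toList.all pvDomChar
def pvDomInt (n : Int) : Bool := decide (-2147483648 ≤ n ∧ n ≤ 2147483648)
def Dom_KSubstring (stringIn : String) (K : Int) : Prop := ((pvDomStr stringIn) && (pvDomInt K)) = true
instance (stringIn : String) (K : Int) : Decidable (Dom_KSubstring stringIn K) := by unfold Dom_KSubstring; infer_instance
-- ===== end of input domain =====

-- B replaces A's rolling Counter/sliding-window pass by a direct scan that recomputes each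
-- fixed-size window's distinct-character count independently (objective: simpler).
-- The Python sets hold strings; both ports hold the corresponding List Char (same cardinalities).

-- ===== PORT A =====
-- one loop iteration of A: bump the Counter, record the window if it has K distinct chars,
-- then (when i >= K-1) decrement/evict the char leaving the window and advance start.
-- (A's `start` is a Python int that only ever counts up from 0, kept as a Nat.)
def pvStepA (s : List Char) (K : Int)
    (st : PySem.Dict Char Int × Nat × PySem.Set (List Char)) (i : Nat) :
    PySem.Dict Char Int × Nat × PySem.Set (List Char) :=
  let table := st.1
  let start := st.2.1
  let result := st.2.2
  let table := table.modify (s.getD i ' ') 0 (· + 1)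
  let result := if ((i : Int) - (start : Int) + 1 == K) && ((table.size : Int) == K)
    then result.add (PySem.List.slice s (some (start : Int)) (some ((i : Int) + 1)))
    else result
  if K - 1 ≤ (i : Int) then
    let c := s.getD start ' '
    let table := table.modify c 0 (· - 1)
    let table := if table.getD c 0 == 0 then table.erase c else table
    (table, start + 1, result)
  else (table, start, result)

def KSubstring (stringIn : String) (K : Int) : Int :=
  (((List.range stringIn.toList.length).foldl (pvStepA stringIn.toList K)
      (PySem.Dict.empty, 0, PySem.Set.empty)).2.2.length : Int)

-- ===== PORT B =====
def pvGoodB (K : Int) (w : List Char) : Bool := ((PySem.Set.ofList w).length : Int) == K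

def pvStepB (s : List Char) (K : Int) (r : PySem.Set (List Char)) (i : Int) :
    PySem.Set (List Char) :=
  let sub := PySem.List.slice s (some i) (some (i + K))
  if pvGoodB K sub then r.add sub else r

def KSubstring_alt (stringIn : String) (K : Int) : Int :=
  if K ≤ 0 then 0
  else
    (((PySem.List.pyRange 0 ((stringIn.toList.length : Int) - K + 1)).foldl
        (pvStepB stringIn.toList K) PySem.Set.empty).length : Int)

-- ===== PRECONDITION & SPEC =====
def Spec_KSubstring (stringIn : String) (K : Int) (out : Int) : Prop := out = KSubstring_alt stringIn K
instance (stringIn : String) (K : Int) (out : Int) : Decidable (Spec_KSubstring stringIn K out) := by unfold Spec_KSubstring; infer_instance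

-- ===== CLAIM (what is proved, stated in full; the proofs are below) =====
def Claim_equal_KSubstring : Prop := ∀ (stringIn : String) (K : Int), Dom_KSubstring stringIn K → Spec_KSubstring stringIn K (KSubstring stringIn K)

-- ===== LEMMAS AND PROOFS =====

-- the window of length k starting at t
def pvWin (s : List Char) (k t : Nat) : List Char := (s.drop t).take k

-- the list of good windows among the first m window positions
def pvCand (s : List Char) (K : Int) (m : Nat) : List (List Char) :=
  ((List.range m).map (pvWin s K.toNat)).filter (pvGoodB K)

-- A's Counter invariant: `d` records exactly the multiset of the current window `w`
def pvTableInv (w : List Char) (d : PySem.Dict Char Int) : Prop :=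
  d.keys.Nodup ∧ (∀ c, d.getD c 0 = (w.count c : Int)) ∧ (∀ c, d.contains c = true ↔ c ∈ w)

lemma pvSet_update_singleton {α : Type} [BEq α] (r : PySem.Set α) (x : α) :
    r.update [x] = r.add x := rfl

lemma pvSet_ofList_concat {α : Type} [BEq α] (l : List α) (x : α) :
    PySem.Set.ofList (l ++ [x]) = (PySem.Set.ofList l).add x := by
  rw [PySem.Set.ofList_append, pvSet_update_singleton]

lemma pvFindFilter (c c' : Char) (l : List (Char × Int)) :
    (l.filter (fun p => !(p.1 == c))).find? (fun p => p.1 == c')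
      = if c' = c then none else l.find? (fun p => p.1 == c') := by
  induction l with
  | nil => simp
  | cons p l ih =>
    rw [List.filter_cons]
    by_cases h1 : p.1 = c
    · rw [if_neg (by simp [h1]), ih]
      by_cases h2 : c' = c
      · rw [if_pos h2, if_pos h2]
      · rw [if_neg h2, if_neg h2,
          List.find?_cons_of_neg (by simp [h1]; exact fun he => h2 he.symm)]
    · rw [if_pos (by simp [h1])]
      by_cases h3 : p.1 = c'
      · have h2 : ¬ c' = c := fun he => h1 (h3.trans he)
        rw [if_neg h2, List.find?_cons_of_pos (by simp [h3]),
          List.find?_cons_of_pos (by simp [h3])]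
      · rw [List.find?_cons_of_neg (by simp [h3]),
          List.find?_cons_of_neg (by simp [h3]), ih]

lemma pvErase_get? (d : PySem.Dict Char Int) (c c' : Char) :
    (d.erase c).get? c' = if c' = c then none else d.get? c' := by
  obtain ⟨items⟩ := d
  simp only [PySem.Dict.erase, PySem.Dict.get?]
  rw [pvFindFilter]
  by_cases h : c' = c <;> simp [h]

lemma pvErase_mem_keys (d : PySem.Dict Char Int) (c c' : Char) :
    c' ∈ (d.erase c).keys ↔ c' ≠ c ∧ c' ∈ d.keys := by
  simp only [PySem.Dict.erase, PySem.Dict.keys, List.mem_map, List.mem_filter]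
  constructor
  · rintro ⟨p, ⟨hp, hpc⟩, rfl⟩
    exact ⟨by simpa using hpc, p, hp, rfl⟩
  · rintro ⟨hne, p, hp, rfl⟩
    exact ⟨p, ⟨hp, by simpa using hne⟩, rfl⟩

lemma pvErase_nodup (d : PySem.Dict Char Int) (c : Char) (h : d.keys.Nodup) :
    (d.erase c).keys.Nodup := by
  simp only [PySem.Dict.erase, PySem.Dict.keys] at *
  exact h.sublist (List.Sublist.map _ List.filter_sublist)

lemma pvModify_nodup (d : PySem.Dict Char Int) (x : Char) (f : Int → Int) (h : d.keys.Nodup) :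
    (d.modify x 0 f).keys.Nodup := by
  have := PySem.Dict.nodup_keys_foldl_insert (ν := Int) [x] (fun d a => f (d.getD a 0)) d h
  simpa [PySem.Dict.modify] using this

lemma pvInv_size (w : List Char) (d : PySem.Dict Char Int) (h : pvTableInv w d) :
    d.size = (PySem.Set.ofList w).length := by
  obtain ⟨hnd, _, hm⟩ := h
  have hperm : d.keys.Perm (PySem.Set.ofList w) := by
    rw [List.perm_ext_iff_of_nodup hnd (PySem.Set.nodup_ofList w)]
    intro a
    rw [PySem.Set.mem_ofList, ← hm a, PySem.Dict.contains_iff_mem_keys]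
  have hlen := hperm.length_eq
  simpa [PySem.Dict.size, PySem.Dict.keys] using hlen

lemma pvInv_inc (w : List Char) (d : PySem.Dict Char Int) (x : Char) (h : pvTableInv w d) :
    pvTableInv (w ++ [x]) (d.modify x 0 (· + 1)) := by
  obtain ⟨hnd, hc, hm⟩ := h
  have hmod : d.modify x 0 (· + 1) = d.insert x (d.getD x 0 + 1) := rfl
  refine ⟨pvModify_nodup d x _ hnd, ?_, ?_⟩
  · intro c
    rw [hmod, PySem.Dict.getD_insert]
    by_cases hcx : c = x
    · subst hcx
      rw [if_pos rfl, hc c, List.count_append]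
      simp
    · rw [if_neg hcx, hc c, List.count_append]
      simp [Ne.symm hcx]
  · intro c
    rw [hmod, PySem.Dict.contains_insert]
    by_cases hcx : c = x
    · subst hcx
      simp
    · have hb : (c == x) = false := by simp [hcx]
      rw [hb, Bool.false_or, hm c]
      simp [hcx]

lemma pvInv_dec (w : List Char) (d : PySem.Dict Char Int) (x : Char)
    (h : pvTableInv (x :: w) d) :
    pvTableInv w
      (let d1 := d.modify x 0 (· - 1);
       if d1.getD x 0 == 0 then d1.erase x else d1) := by
  obtain ⟨hnd, hc, hm⟩ := h
  have hmod : d.modify x 0 (· - 1) = d.insert x ((w.count x : Int)) := by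
    show d.insert x (d.getD x 0 - 1) = _
    rw [hc x, List.count_cons_self]
    push_cast
    ring_nf
  show pvTableInv w
      (if (d.modify x 0 (· - 1)).getD x 0 == 0 then (d.modify x 0 (· - 1)).erase x
       else d.modify x 0 (· - 1))
  have hnd1 : (d.modify x 0 (· - 1)).keys.Nodup := pvModify_nodup d x _ hnd
  have hgetd1 : ∀ c, (d.modify x 0 (· - 1)).getD c 0
      = if c = x then (w.count x : Int) else ((x :: w).count c : Int) := by
    intro c
    rw [hmod, PySem.Dict.getD_insert]
    by_cases hcx : c = x <;> simp [hcx, hc c]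
  have hcont1 : ∀ c, (d.modify x 0 (· - 1)).contains c = (c == x || d.contains c) := by
    intro c
    rw [hmod, PySem.Dict.contains_insert]
  have hx0 : (d.modify x 0 (· - 1)).getD x 0 = (w.count x : Int) := by simp [hgetd1]
  by_cases hwx : x ∈ w
  · have hcnt : w.count x ≠ 0 := fun h0 => (List.count_eq_zero.mp h0) hwx
    rw [if_neg (by rw [hx0]; simpa using fun h0 => hcnt (by exact_mod_cast h0))]
    refine ⟨hnd1, ?_, ?_⟩
    · intro c
      rw [hgetd1]
      by_cases hcx : c = x
      · simp [hcx]
      · rw [if_neg hcx, List.count_cons_of_ne (Ne.symm hcx)]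
    · intro c
      rw [hcont1]
      by_cases hcx : c = x
      · subst hcx
        simp [hwx]
      · have hb : (c == x) = false := by simp [hcx]
        rw [hb, Bool.false_or, hm c]
        simp [hcx]
  · have hcnt : w.count x = 0 := List.count_eq_zero.mpr hwx
    rw [if_pos (by rw [hx0, hcnt]; simp)]
    refine ⟨pvErase_nodup _ x hnd1, ?_, ?_⟩
    · intro c
      show (((d.modify x 0 (· - 1)).erase x).get? c).getD 0 = _
      rw [pvErase_get?]
      by_cases hcx : c = x
      · simp [hcx, hcnt]
      · rw [if_neg hcx]
        have heq : ((d.modify x 0 (· - 1)).get? c).getD 0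
            = (d.modify x 0 (· - 1)).getD c 0 := rfl
        rw [heq, hgetd1, if_neg hcx, List.count_cons_of_ne (Ne.symm hcx)]
    · intro c
      rw [PySem.Dict.contains_iff_mem_keys, pvErase_mem_keys,
        ← PySem.Dict.contains_iff_mem_keys, hcont1]
      by_cases hcx : c = x
      · simp [hcx, hwx]
      · have hb : (c == x) = false := by simp [hcx]
        rw [hb, Bool.false_or, hm c]
        simp [List.mem_cons, hcx]

-- A's loop invariant for K ≥ 1
lemma pvAinv (s : List Char) (K : Int) (hK : 1 ≤ K) :
    ∀ j, j ≤ s.length → ∃ d,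
      (List.range j).foldl (pvStepA s K) (PySem.Dict.empty, 0, PySem.Set.empty)
        = (d, j - (K.toNat - 1), PySem.Set.ofList (pvCand s K (j + 1 - K.toNat)))
      ∧ pvTableInv ((s.take j).drop (j - (K.toNat - 1))) d := by
  have hKk : K = (K.toNat : Int) := (Int.toNat_of_nonneg (by omega)).symm
  have hk1 : 1 ≤ K.toNat := by omega
  intro j
  induction j with
  | zero =>
    intro _
    refine ⟨PySem.Dict.empty, ?_, ?_⟩
    · have h1 : 1 - K.toNat = 0 := by omega
      simp [h1, pvCand, PySem.Set.ofList, PySem.Set.empty]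
    · refine ⟨by simp [PySem.Dict.empty, PySem.Dict.keys], ?_, ?_⟩ <;>
        intro c <;>
        simp [PySem.Dict.empty, PySem.Dict.getD, PySem.Dict.get?, PySem.Dict.contains]
  | succ j ih =>
    intro hj1
    obtain ⟨d, hd, hinv⟩ := ih (by omega)
    have hjn : j < s.length := by omega
    rw [List.range_succ, List.foldl_append, hd, List.foldl_cons, List.foldl_nil]
    have hsj : j - (K.toNat - 1) ≤ j := by omega
    have hW1 : (s.take (j + 1)).drop (j - (K.toNat - 1))
        = ((s.take j).drop (j - (K.toNat - 1))) ++ [s.getD j ' '] := by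
      rw [List.take_add_one, List.getElem?_eq_getElem hjn]
      simp only [Option.toList_some]
      rw [← List.getD_eq_getElem s ' ' hjn,
        List.drop_append_of_le_length (by simp [List.length_take]; omega)]
    have hinv1 : pvTableInv ((s.take (j + 1)).drop (j - (K.toNat - 1)))
        (d.modify (s.getD j ' ') 0 (· + 1)) := by
      rw [hW1]
      exact pvInv_inc _ _ _ hinv
    by_cases hcase : K.toNat ≤ j + 1
    · -- the window is full: a candidate is tested and start advances
      have hwin : (s.take (j + 1)).drop (j - (K.toNat - 1))
          = pvWin s K.toNat (j + 1 - K.toNat) := by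
        rw [show j - (K.toNat - 1) = j + 1 - K.toNat by omega, pvWin, List.drop_take]
        congr 1
        omega
      have hc1 : (((j : Int) - ((j - (K.toNat - 1) : Nat) : Int) + 1 == K) = true) := by
        simp only [beq_iff_eq]
        omega
      have hsz : (((d.modify (s.getD j ' ') 0 (· + 1)).size : Int) == K)
          = pvGoodB K (pvWin s K.toNat (j + 1 - K.toNat)) := by
        rw [pvInv_size _ _ hinv1, hwin, pvGoodB]
      have hbr : K - 1 ≤ (j : Int) := by omega
      have hslice : PySem.List.slice s (some ((j - (K.toNat - 1) : Nat) : Int))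
            (some ((j : Int) + 1))
          = pvWin s K.toNat (j + 1 - K.toNat) := by
        rw [show ((j : Int) + 1) = (((j + 1 : Nat) : Nat) : Int) by push_cast; ring,
          PySem.List.slice_natCast, pvWin,
          show j - (K.toNat - 1) = j + 1 - K.toNat by omega]
        congr 1
        omega
      have hcons : (s.take (j + 1)).drop (j - (K.toNat - 1))
          = (s.getD (j - (K.toNat - 1)) ' ')
              :: ((s.take (j + 1)).drop ((j - (K.toNat - 1)) + 1)) := by
        have hlt : j - (K.toNat - 1) < (s.take (j + 1)).length := by
          simp only [List.length_take]
          omega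
        rw [List.drop_eq_getElem_cons hlt, List.getElem_take,
          List.getD_eq_getElem s ' ' (by omega)]
      have hinv2 : pvTableInv ((s.take (j + 1)).drop ((j - (K.toNat - 1)) + 1))
          (if ((d.modify (s.getD j ' ') 0 (· + 1)).modify (s.getD (j - (K.toNat - 1)) ' ') 0
                (· - 1)).getD (s.getD (j - (K.toNat - 1)) ' ') 0 == 0
           then ((d.modify (s.getD j ' ') 0 (· + 1)).modify (s.getD (j - (K.toNat - 1)) ' ') 0
                (· - 1)).erase (s.getD (j - (K.toNat - 1)) ' ')
           else (d.modify (s.getD j ' ') 0 (· + 1)).modify (s.getD (j - (K.toNat - 1)) ' ') 0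
                (· - 1)) := by
        rw [hcons] at hinv1
        exact pvInv_dec _ _ _ hinv1
      have hres : (if pvGoodB K (pvWin s K.toNat (j + 1 - K.toNat))
            then (PySem.Set.ofList (pvCand s K (j + 1 - K.toNat))).add
              (pvWin s K.toNat (j + 1 - K.toNat))
            else PySem.Set.ofList (pvCand s K (j + 1 - K.toNat)))
          = PySem.Set.ofList (pvCand s K ((j + 1) + 1 - K.toNat)) := by
        rw [show (j + 1) + 1 - K.toNat = (j + 1 - K.toNat) + 1 by omega]
        conv_rhs => rw [pvCand, List.range_succ, List.map_append, List.filter_append]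
        by_cases hg : pvGoodB K (pvWin s K.toNat (j + 1 - K.toNat))
        · rw [if_pos hg]
          simp only [List.map_cons, List.map_nil, List.filter_cons, List.filter_nil, hg,
            if_true]
          rw [pvSet_ofList_concat]
          rfl
        · rw [if_neg hg]
          simp only [List.map_cons, List.map_nil, List.filter_cons, List.filter_nil]
          rw [if_neg (by simp [hg]), List.append_nil]
          rfl
      refine ⟨(if (((d.modify (s.getD j ' ') 0 (· + 1)).modify (s.getD (j - (K.toNat - 1)) ' ') 0
                (· - 1)).getD (s.getD (j - (K.toNat - 1)) ' ') 0 == 0)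
          then ((d.modify (s.getD j ' ') 0 (· + 1)).modify (s.getD (j - (K.toNat - 1)) ' ') 0
                (· - 1)).erase (s.getD (j - (K.toNat - 1)) ' ')
          else (d.modify (s.getD j ' ') 0 (· + 1)).modify (s.getD (j - (K.toNat - 1)) ' ') 0
                (· - 1)), ?_, ?_⟩
      · show pvStepA s K
            (d, j - (K.toNat - 1), PySem.Set.ofList (pvCand s K (j + 1 - K.toNat))) j = _
        simp only [pvStepA, hc1, hsz, Bool.true_and, hslice, if_pos hbr]
        rw [hres, show j + 1 - (K.toNat - 1) = (j - (K.toNat - 1)) + 1 by omega]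
      · rw [show j + 1 - (K.toNat - 1) = (j - (K.toNat - 1)) + 1 by omega]
        exact hinv2
    · -- the window is still growing: nothing recorded, start stays 0
      have hc1 : (((j : Int) - ((j - (K.toNat - 1) : Nat) : Int) + 1 == K) = false) := by
        simp only [beq_eq_false_iff_ne]
        omega
      have hbr : ¬ (K - 1 ≤ (j : Int)) := by omega
      refine ⟨d.modify (s.getD j ' ') 0 (· + 1), ?_, ?_⟩
      · show pvStepA s K
            (d, j - (K.toNat - 1), PySem.Set.ofList (pvCand s K (j + 1 - K.toNat))) j = _
        simp only [pvStepA, hc1, Bool.false_and, Bool.false_eq_true, if_false, if_neg hbr]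
        rw [show j + 1 - (K.toNat - 1) = j - (K.toNat - 1) by omega,
          show (j + 1) + 1 - K.toNat = j + 1 - K.toNat by omega]
      · rw [show j + 1 - (K.toNat - 1) = j - (K.toNat - 1) by omega]
        exact hinv1

-- A's loop for K ≤ 0: start chases i and nothing is ever recorded
lemma pvAzero (s : List Char) (K : Int) (hK : K ≤ 0) :
    ∀ j, ∃ d,
      (List.range j).foldl (pvStepA s K) (PySem.Dict.empty, 0, PySem.Set.empty)
        = (d, j, PySem.Set.empty) := by
  intro j
  induction j with
  | zero => exact ⟨PySem.Dict.empty, rfl⟩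
  | succ j ih =>
    obtain ⟨d, hd⟩ := ih
    rw [List.range_succ, List.foldl_append, hd, List.foldl_cons, List.foldl_nil]
    have hc1 : (((j : Int) - ((j : Nat) : Int) + 1 == K) = false) := by
      simp only [beq_eq_false_iff_ne]
      omega
    have hbr : K - 1 ≤ (j : Int) := by omega
    refine ⟨(if ((d.modify (s.getD j ' ') 0 (· + 1)).modify (s.getD j ' ') 0
            (· - 1)).getD (s.getD j ' ') 0 == 0
        then ((d.modify (s.getD j ' ') 0 (· + 1)).modify (s.getD j ' ') 0
            (· - 1)).erase (s.getD j ' ')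
        else (d.modify (s.getD j ' ') 0 (· + 1)).modify (s.getD j ' ') 0 (· - 1)), ?_⟩
    show pvStepA s K (d, j, PySem.Set.empty) j = _
    simp only [pvStepA, hc1, Bool.false_and, Bool.false_eq_true, if_false, if_pos hbr]

-- B's fold builds exactly the set of the good-window list
lemma pvBfold (s : List Char) (K : Int) (hK : 1 ≤ K) :
    ∀ (m : Nat) (r : PySem.Set (List Char)),
      ((List.range m).map (fun t : Nat => (t : Int))).foldl (pvStepB s K) r
        = r.update (pvCand s K m) := by
  intro m
  induction m with
  | zero => intro r; simp [pvCand, PySem.Set.update]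
  | succ m ih =>
    intro r
    rw [List.range_succ, List.map_append, List.foldl_append, ih]
    simp only [List.map_cons, List.map_nil, List.foldl_cons, List.foldl_nil]
    have hslice : PySem.List.slice s (some (m : Int)) (some ((m : Int) + K))
        = pvWin s K.toNat m := by
      rw [show ((m : Int) + K) = ((m + K.toNat : Nat) : Int) by push_cast; omega,
        PySem.List.slice_natCast, pvWin]
      congr 1
      omega
    simp only [pvStepB, hslice]
    have hcand : pvCand s K (m + 1)
        = pvCand s K m
            ++ if pvGoodB K (pvWin s K.toNat m) then [pvWin s K.toNat m] else [] := by
      rw [pvCand, pvCand, List.range_succ, List.map_append, List.filter_append]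
      simp only [List.map_cons, List.map_nil, List.filter_cons, List.filter_nil]
    rw [hcand]
    by_cases hg : pvGoodB K (pvWin s K.toNat m)
    · rw [if_pos hg, if_pos hg]
      simp only [PySem.Set.update, List.foldl_append, List.foldl_cons, List.foldl_nil]
    · rw [if_neg hg, if_neg hg, List.append_nil]

lemma pvBchar (stringIn : String) (K : Int) (hK : 1 ≤ K) :
    KSubstring_alt stringIn K
      = ((PySem.Set.ofList (pvCand stringIn.toList K (stringIn.toList.length + 1 - K.toNat))).length : Int) := by
  unfold KSubstring_alt
  rw [if_neg (by omega)]
  by_cases hcase : K.toNat ≤ stringIn.toList.length + 1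
  · rw [show ((stringIn.toList.length : Int) - K + 1)
        = ((stringIn.toList.length + 1 - K.toNat : Nat) : Int) by omega,
      PySem.List.pyRange_zero_natCast, pvBfold stringIn.toList K hK]
    rfl
  · have hlen : stringIn.toList.length = stringIn.length := by simp
    have hempty : PySem.List.pyRange 0 ((stringIn.toList.length : Int) - K + 1) = [] := by
      simp [PySem.List.pyRange]
      omega
    rw [hempty, show stringIn.toList.length + 1 - K.toNat = 0 by omega]
    simp [pvCand, PySem.Set.ofList, PySem.Set.empty]

-- ===== VERDICT (by name: the statement is the Claim_ definition above) =====
theorem KSubstring_spec : Claim_equal_KSubstring := by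
  intro stringIn K _hDom
  unfold Spec_KSubstring
  by_cases hK : K ≤ 0
  · obtain ⟨d, hd⟩ := pvAzero stringIn.toList K hK stringIn.toList.length
    unfold KSubstring
    rw [hd]
    simp [KSubstring_alt, hK, PySem.Set.empty]
  · have hK1 : 1 ≤ K := by omega
    obtain ⟨d, hd, _⟩ := pvAinv stringIn.toList K hK1 stringIn.toList.length le_rfl
    unfold KSubstring
    rw [pvBchar stringIn K hK1, hd]
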